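-- pv_equiv track=rewrite | github.com/ankit-chaubey/TGLib | tglib/utils.py | get_appropriated_part_size
-- ===== SOURCE A (Python) =====
-- def get_appropriated_part_size(file_size: int) -> int:
--     """Return the optimal part size in KB for uploading a file of *file_size* bytes."""
--     # Mirroring Telethon's table
--     for limit, part in (
--         (104857600,  64),   # 100 MB → 64 KB parts
--         (786432000, 256),   # 750 MB → 256 KB parts
--     ):
--         if file_size <= limit:
--             return part
--     return 512  # maximum allowed by Telegram
-- ===== SOURCE B (Python) =====
-- import bisect
--
-- _LIMITS = [104857600, 786432000]
-- _PARTS = [64, 256, 512]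
--
-- def get_appropriated_part_size(file_size: int) -> int:
--     """Return the optimal part size in KB for uploading a file of *file_size* bytes."""
--     return _PARTS[bisect.bisect_left(_LIMITS, file_size)]
-- ===== Notes on version B (the rewrite author's own statement) =====
-- stated objective: idiomatic
-- what changed: Replaced the sequential per-limit comparison loop with a bisect_left binary search into a constant threshold table indexing a parallel parts list.
import Mathlib
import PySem

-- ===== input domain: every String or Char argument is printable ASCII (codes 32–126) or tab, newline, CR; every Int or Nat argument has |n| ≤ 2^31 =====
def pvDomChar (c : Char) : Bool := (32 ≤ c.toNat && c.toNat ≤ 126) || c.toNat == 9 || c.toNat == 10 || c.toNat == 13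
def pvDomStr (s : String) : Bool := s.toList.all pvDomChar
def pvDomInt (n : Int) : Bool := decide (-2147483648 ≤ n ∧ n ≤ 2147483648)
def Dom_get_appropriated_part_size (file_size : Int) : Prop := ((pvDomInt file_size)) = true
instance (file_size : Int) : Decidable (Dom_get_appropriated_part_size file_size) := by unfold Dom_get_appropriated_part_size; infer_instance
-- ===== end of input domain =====

-- B replaces A's sequential threshold scan with a bisect_left binary search into a constant table (idiomatic).

-- ===== PORT A =====
-- A's for-loop over the (limit, part) tuple: return the first part whose limit admits file_size, else 512.
def pvScanA (file_size : Int) : List (Int × Int) → Int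
  | [] => 512
  | (limit, part) :: rest => if file_size ≤ limit then part else pvScanA file_size rest

def get_appropriated_part_size (file_size : Int) : Int :=
  pvScanA file_size [(104857600, 64), (786432000, 256)]

-- ===== PORT B =====
-- bisect.bisect_left ported step for step (binary search maintaining lo/hi).
def pvBisectLeft (xs : List Int) (x : Int) (lo hi : Nat) : Nat :=
  if _h : lo < hi then
    let mid := (lo + hi) / 2
    if xs.getD mid 0 < x then pvBisectLeft xs x (mid + 1) hi
    else pvBisectLeft xs x lo mid
  else lo
termination_by hi - lo
decreasing_by all_goals omega

def pvLimits : List Int := [104857600, 786432000]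
def pvParts : List Int := [64, 256, 512]

def get_appropriated_part_size_alt (file_size : Int) : Int :=
  pvParts.getD (pvBisectLeft pvLimits file_size 0 pvLimits.length) 0

-- ===== PRECONDITION & SPEC =====
def Spec_get_appropriated_part_size (file_size : Int) (out : Int) : Prop := out = get_appropriated_part_size_alt file_size
instance (file_size : Int) (out : Int) : Decidable (Spec_get_appropriated_part_size file_size out) := by unfold Spec_get_appropriated_part_size; infer_instance

-- ===== CLAIM (what is proved, stated in full; the proofs are below) =====
def Claim_equal_get_appropriated_part_size : Prop := ∀ (file_size : Int), Dom_get_appropriated_part_size file_size → Spec_get_appropriated_part_size file_size (get_appropriated_part_size file_size)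

-- ===== LEMMAS AND PROOFS =====
theorem pvBisectLeft_eval (x : Int) :
    pvBisectLeft pvLimits x 0 2 =
      if x ≤ 104857600 then 0 else if x ≤ 786432000 then 1 else 2 := by
  by_cases h1 : x ≤ 104857600
  · rw [pvBisectLeft.eq_def]
    have h2 : x ≤ 786432000 := by omega
    simp [pvLimits, h1, not_lt.mpr h1, not_lt.mpr h2, pvBisectLeft.eq_def]
  · by_cases h2 : x ≤ 786432000
    · rw [pvBisectLeft.eq_def]
      simp [pvLimits, h1, h2, not_le.mp h1, not_lt.mpr h2, pvBisectLeft.eq_def]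
    · rw [pvBisectLeft.eq_def]
      simp [pvLimits, h1, h2, not_le.mp h2, pvBisectLeft.eq_def]

-- ===== VERDICT (by name: the statement is the Claim_ definition above) =====
theorem get_appropriated_part_size_spec : Claim_equal_get_appropriated_part_size := by
  intro file_size _
  unfold Spec_get_appropriated_part_size get_appropriated_part_size get_appropriated_part_size_alt
  rw [show pvLimits.length = 2 from rfl, pvBisectLeft_eval]
  simp only [pvScanA, pvParts]
  split_ifs <;> rfl
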